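-- pv_equiv track=rewrite | github.com/lauploix/advent-of-code | 2023/d01/solutions_test.py | extract
-- ===== SOURCE A (Python) =====
-- def extract(s):
--     numbers= "one two three four five six seven eight nine".split(" ")
--     extract_next = True
--     if s:
--         if s[0] >= "1" and s[0] <= "9":
--             yield s[0]
--         else:
--             for i, item in enumerate(numbers):
--                 if s.startswith (item):
--                     yield from extract (str(i+1) + s[1:])
--                     return
--         yield from extract (s[1:])
-- ===== SOURCE B (Python) =====
-- def extract(s):
--     # Single left-to-right index pass: at each position yield the digit, or the
--     # digit for a spelled-out word starting there, then advance one character.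
--     words = ("one", "two", "three", "four", "five", "six", "seven", "eight", "nine")
--     for i in range(len(s)):
--         c = s[i]
--         if "1" <= c <= "9":
--             yield c
--         else:
--             for d, w in enumerate(words, 1):
--                 if s.startswith(w, i):
--                     yield str(d)
--                     break
-- ===== Notes on version B (the rewrite author's own statement) =====
-- stated objective: faster
-- what changed: A recursively rebuilds the remaining string on every step and splices the digit back in on a spelled-word match before restarting; B makes one index-based pass, at each position yielding the digit character or the digit of a spelled word starting there.
import Mathlib
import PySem

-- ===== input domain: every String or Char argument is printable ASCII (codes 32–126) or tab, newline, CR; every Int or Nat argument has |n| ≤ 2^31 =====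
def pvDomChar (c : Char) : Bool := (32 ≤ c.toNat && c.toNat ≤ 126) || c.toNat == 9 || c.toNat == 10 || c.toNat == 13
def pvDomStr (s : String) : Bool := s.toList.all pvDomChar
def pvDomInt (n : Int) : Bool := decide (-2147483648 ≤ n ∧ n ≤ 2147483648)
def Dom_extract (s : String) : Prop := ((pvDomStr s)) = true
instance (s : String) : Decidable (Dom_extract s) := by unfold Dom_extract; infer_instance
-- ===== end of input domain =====

-- B replaces A's O(n^2) recursion (which rebuilds the remaining string and restarts on every
-- spelled-word match) by a single left-to-right pass emitting a digit per position.
-- A is a Python generator; equivalence is about the yielded sequence, as a list.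

-- ===== PORT A =====

-- `"one two three four five six seven eight nine".split(" ")`, as lists of chars
def pvNumbersA : List (List Char) :=
  ((PySem.Str.split? "one two three four five six seven eight nine" " ").getD []).map String.toList

-- the `for i, item in enumerate(numbers): if s.startswith(item): … return` loop:
-- first index whose word is a prefix of s, else none
def pvFindWordA (l : List Char) : List (Int × List Char) → Option Int
  | [] => none
  | (i, w) :: ws => if PySem.Chars.startswith l w then some i else pvFindWordA l ws

-- termination helpers for the port of A (A recurses on `str(i+1) + s[1:]`, same length as s)
theorem pvFindWordA_cases {l : List Char} {ws : List (Int × List Char)} {i : Int}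
    (h : pvFindWordA l ws = some i) : ∃ w, (i, w) ∈ ws := by
  induction ws with
  | nil => simp [pvFindWordA] at h
  | cons p ps ih =>
    obtain ⟨j, w⟩ := p
    by_cases hp : PySem.Chars.startswith l w
    · simp [pvFindWordA, hp] at h; exact ⟨w, by simp [h]⟩
    · simp [pvFindWordA, hp] at h
      obtain ⟨w', hw⟩ := ih h
      exact ⟨w', List.mem_cons_of_mem _ hw⟩

theorem pvFindWordA_range {l : List Char} {i : Int}
    (h : pvFindWordA l (PySem.List.enumerate pvNumbersA 0) = some i) : 0 ≤ i ∧ i < 9 := by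
  obtain ⟨w, hw⟩ := pvFindWordA_cases h
  have hall : ∀ p ∈ PySem.List.enumerate pvNumbersA 0, 0 ≤ p.1 ∧ p.1 < 9 := by decide
  exact hall (i, w) hw

theorem pvToStr_digit {i : Int} (h0 : 0 ≤ i) (h9 : i < 9) :
    (PySem.Int.toStr (i + 1)).toList = [Char.ofNat (49 + i.toNat)] := by
  interval_cases i <;> decide

-- measure: a string headed by a digit 1-9 costs one step less
def pvMeasA : List Char → Nat
  | [] => 0
  | c :: rest => 2 * rest.length + (if '1' ≤ c ∧ c ≤ '9' then 1 else 2)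

theorem pvMeasA_cons (c : Char) (rest : List Char) :
    pvMeasA (c :: rest) = 2 * rest.length + (if '1' ≤ c ∧ c ≤ '9' then 1 else 2) := rfl

theorem pvMeasA_le (l : List Char) : pvMeasA l ≤ 2 * l.length := by
  cases l with
  | nil => simp [pvMeasA]
  | cons c rest => simp only [pvMeasA, List.length_cons]; split_ifs <;> omega

-- literal port of A: generator `extract(s)` collected into the list of yields
def pvExtractA (l : List Char) : List String :=
  match l with
  | [] => []
  | c :: rest =>
    if hd : '1' ≤ c ∧ c ≤ '9' then
      String.ofList [c] :: pvExtractA rest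
    else
      match hf : pvFindWordA (c :: rest) (PySem.List.enumerate pvNumbersA 0) with
      | some i => pvExtractA ((PySem.Int.toStr (i + 1)).toList ++ rest)
      | none => pvExtractA rest
termination_by pvMeasA l
decreasing_by
  · have := pvMeasA_le rest; rw [pvMeasA_cons, if_pos hd]; omega
  · obtain ⟨h0, h9⟩ := pvFindWordA_range hf
    rw [pvToStr_digit h0 h9]
    have hdig : '1' ≤ Char.ofNat (49 + i.toNat) ∧ Char.ofNat (49 + i.toNat) ≤ '9' := by
      interval_cases i <;> decide
    rw [List.singleton_append, pvMeasA_cons, pvMeasA_cons, if_pos hdig, if_neg hd]; omega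
  · have := pvMeasA_le rest; rw [pvMeasA_cons, if_neg hd]; omega

def extract (s : String) : List String := pvExtractA s.toList

-- ===== PORT B =====

-- word table paired with the digit to yield, `enumerate(words, 1)` style
def pvWordsB : List (List Char × Char) :=
  [("one".toList, '1'), ("two".toList, '2'), ("three".toList, '3'),
   ("four".toList, '4'), ("five".toList, '5'), ("six".toList, '6'),
   ("seven".toList, '7'), ("eight".toList, '8'), ("nine".toList, '9')]

-- inner `for d, w … if s.startswith(w, i): yield str(d); break`
def pvDigitAt (l : List Char) : List (List Char × Char) → Option Char
  | [] => none
  | (w, d) :: ws => if PySem.Chars.startswith l w then some d else pvDigitAt l ws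

-- single pass: what position i contributes, then advance one char
def pvExtractB : List Char → List String
  | [] => []
  | c :: rest =>
    (if '1' ≤ c ∧ c ≤ '9' then [String.ofList [c]]
     else match pvDigitAt (c :: rest) pvWordsB with
       | some d => [String.ofList [d]]
       | none => []) ++ pvExtractB rest

def extract_alt (s : String) : List String := pvExtractB s.toList

-- ===== PRECONDITION & SPEC =====
def Spec_extract (s : String) (out : List String) : Prop := out = extract_alt s
instance (s : String) (out : List String) : Decidable (Spec_extract s out) := by unfold Spec_extract; infer_instance

-- ===== CLAIM (what is proved, stated in full; the proofs are below) =====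
def Claim_equal_extract : Prop := ∀ (s : String), Dom_extract s → Spec_extract s (extract s)

-- ===== LEMMAS AND PROOFS =====

-- A's word scan and B's word scan agree: B's digit is the char '1'+i for A's index i
theorem pvFind_agree (l : List Char) :
    pvDigitAt l pvWordsB = (pvFindWordA l (PySem.List.enumerate pvNumbersA 0)).map
      (fun i => Char.ofNat (49 + i.toNat)) := by
  have hE : PySem.List.enumerate pvNumbersA 0 =
      [(0, "one".toList), (1, "two".toList), (2, "three".toList), (3, "four".toList),
       (4, "five".toList), (5, "six".toList), (6, "seven".toList), (7, "eight".toList),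
       (8, "nine".toList)] := by decide
  rw [hE]
  simp only [pvWordsB, pvDigitAt, pvFindWordA]
  split_ifs <;> decide

theorem pvExtract_agree (l : List Char) : pvExtractA l = pvExtractB l := by
  induction hn : pvMeasA l using Nat.strong_induction_on generalizing l with
  | _ n ih =>
  match l with
  | [] => simp [pvExtractA, pvExtractB]
  | c :: rest =>
    by_cases hd : '1' ≤ c ∧ c ≤ '9'
    · rw [pvExtractA, pvExtractB]
      simp only [hd]
      rw [ih (pvMeasA rest) (by subst hn; have := pvMeasA_le rest; rw [pvMeasA_cons, if_pos hd]; omega) rest rfl]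
      simp
    · rw [pvExtractA, pvExtractB]
      simp only [hd, dif_neg, if_neg, not_false_iff]
      rw [pvFind_agree]
      match hf : pvFindWordA (c :: rest) (PySem.List.enumerate pvNumbersA 0) with
      | some i =>
        obtain ⟨h0, h9⟩ := pvFindWordA_range hf
        simp only [Option.map_some]
        rw [pvToStr_digit h0 h9]
        have hdig : '1' ≤ Char.ofNat (49 + i.toNat) ∧ Char.ofNat (49 + i.toNat) ≤ '9' := by
          interval_cases i <;> decide
        rw [show (([Char.ofNat (49 + i.toNat)] : List Char) ++ rest) = Char.ofNat (49 + i.toNat) :: rest by simp]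
        rw [pvExtractA]
        simp only [hdig]
        rw [ih (pvMeasA rest) (by subst hn; have := pvMeasA_le rest; rw [pvMeasA_cons, if_neg hd]; omega) rest rfl]
        simp
      | none =>
        simp only [Option.map_none]
        rw [ih (pvMeasA rest) (by subst hn; have := pvMeasA_le rest; rw [pvMeasA_cons, if_neg hd]; omega) rest rfl]
        simp

-- ===== VERDICT (by name: the statement is the Claim_ definition above) =====
theorem extract_spec : Claim_equal_extract := by
  intro s _
  unfold Spec_extract extract extract_alt
  exact pvExtract_agree s.toList
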